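-- pv_equiv track=rewrite | github.com/TianPeilong/learn-book | interview/algorithms/1 minInArray.py | minArr
-- ===== SOURCE A (Python) =====
-- def minArr(arr):
--     if not arr:
--         return 0
--     if len(arr) == 1:
--         return arr[0] ** 2
--     stack = [0]
--     maxV = arr[0] ** 2
--     for i in range(1, len(arr)):
--         if arr[i] >= arr[stack[-1]]:
--             stack.append(i)
--         else:
--             while stack and arr[stack[-1]] > arr[i]:
--                 cur = stack.pop()
--                 left = -1
--                 if stack:
--                     left = stack[-1]
--                 curV = sum(arr[left+1:i]) * arr[cur]
--                 maxV = max(maxV, curV)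
--             stack.append(i)
--     right = len(arr)
--     while stack:
--         cur = stack.pop()
--         left = -1
--         if stack:
--             left = stack[-1]
--         curV = sum(arr[left+1:right]) * arr[cur]
--         maxV = max(maxV, curV)
--     return maxV
-- ===== SOURCE B (Python) =====
-- def minArr(arr):
--     # O(n): prefix sums + one monotonic-stack pass with a sentinel flush at i == n.
--     if not arr:
--         return 0
--     n = len(arr)
--     pre = [0] * (n + 1)
--     for i, x in enumerate(arr):
--         pre[i + 1] = pre[i] + x
--     best = arr[0] * arr[0]
--     stack = []
--     for i in range(n + 1):
--         while stack and (i == n or arr[stack[-1]] > arr[i]):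
--             cur = stack.pop()
--             left = stack[-1] if stack else -1
--             best = max(best, (pre[i] - pre[left + 1]) * arr[cur])
--         if i < n:
--             stack.append(i)
--     return best
-- ===== Notes on version B (the rewrite author's own statement) =====
-- stated objective: faster
-- what changed: Precomputed prefix sums replace each pop's O(n) slice sum by an O(1) difference, and the main loop and the trailing drain are merged into one pass over range(n+1) with i == n acting as a sentinel that flushes the stack, removing the len==1 special case.
import Mathlib
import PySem

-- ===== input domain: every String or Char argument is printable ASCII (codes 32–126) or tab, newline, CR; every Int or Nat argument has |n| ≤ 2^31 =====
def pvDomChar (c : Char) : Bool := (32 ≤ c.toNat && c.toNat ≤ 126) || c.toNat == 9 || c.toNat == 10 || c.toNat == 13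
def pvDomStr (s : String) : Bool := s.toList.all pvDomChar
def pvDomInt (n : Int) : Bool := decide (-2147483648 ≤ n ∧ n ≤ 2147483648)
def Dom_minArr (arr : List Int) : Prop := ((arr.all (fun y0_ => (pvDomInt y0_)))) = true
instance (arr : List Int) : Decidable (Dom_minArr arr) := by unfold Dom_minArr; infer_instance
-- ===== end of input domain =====

-- B replaces A's per-pop slice sums by prefix-sum differences and merges A's main loop
-- and trailing drain into one sentinel pass over range(n+1) (objective: faster).

-- `left = stack[-1] if stack else -1` (the remaining stack's top), used by both programs
def popLeft (rest : List Nat) : Int :=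
  match rest with
  | [] => -1
  | l :: _ => (l : Int)

-- ===== PORT A =====
-- the inner `while stack and arr[stack[-1]] > arr[i]` loop of A (stack top at the head)
def aWhile (arr : List Int) (i : Nat) : List Nat → Int → List Nat × Int
  | [], m => ([], m)
  | cur :: rest, m =>
    if arr.getD cur 0 > arr.getD i 0 then
      aWhile arr i rest
        (max m ((PySem.List.slice arr (some (popLeft rest + 1)) (some (i : Int))).sum * arr.getD cur 0))
    else (cur :: rest, m)

-- one iteration of A's `for i in range(1, len(arr))` loop
def aStep (arr : List Int) (sm : List Nat × Int) (i : Nat) : List Nat × Int :=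
  if arr.getD i 0 ≥ arr.getD (sm.1.headD 0) 0 then (i :: sm.1, sm.2)
  else
    let sm2 := aWhile arr i sm.1 sm.2
    (i :: sm2.1, sm2.2)

-- the trailing `while stack:` drain of A, with right = len(arr)
def aFlush (arr : List Int) : List Nat → Int → Int
  | [], m => m
  | cur :: rest, m =>
    aFlush arr rest
      (max m ((PySem.List.slice arr (some (popLeft rest + 1)) (some (arr.length : Int))).sum * arr.getD cur 0))

def minArr (arr : List Int) : Int :=
  if arr = [] then 0
  else if arr.length = 1 then arr.getD 0 0 ^ 2
  else
    let sm := (List.range' 1 (arr.length - 1)).foldl (aStep arr) ([0], arr.getD 0 0 ^ 2)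
    aFlush arr sm.1 sm.2

-- ===== PORT B =====
-- pre[0..n]: prefix sums of arr, built left to right as in Source B
def bPre (arr : List Int) : List Int :=
  (arr.foldl (fun (p : List Int × Int) x => (p.1 ++ [p.2 + x], p.2 + x)) ([0], 0)).1

-- the inner `while stack and (i == n or arr[stack[-1]] > arr[i])` loop of B
def bWhile (arr pre : List Int) (i : Nat) : List Nat → Int → List Nat × Int
  | [], b => ([], b)
  | cur :: rest, b =>
    if i = arr.length ∨ arr.getD cur 0 > arr.getD i 0 then
      bWhile arr pre i rest
        (max b ((pre.getD i 0 - pre.getD (popLeft rest + 1).toNat 0) * arr.getD cur 0))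
    else (cur :: rest, b)

-- one iteration of B's `for i in range(n + 1)` loop
def bStep (arr pre : List Int) (sb : List Nat × Int) (i : Nat) : List Nat × Int :=
  let sb2 := bWhile arr pre i sb.1 sb.2
  if i < arr.length then (i :: sb2.1, sb2.2) else sb2

def minArr_alt (arr : List Int) : Int :=
  match arr with
  | [] => 0
  | a0 :: _ =>
    let pre := bPre arr
    ((List.range (arr.length + 1)).foldl (bStep arr pre) ([], a0 * a0)).2

-- ===== PRECONDITION & SPEC =====
def Spec_minArr (arr : List Int) (out : Int) : Prop := out = minArr_alt arr
instance (arr : List Int) (out : Int) : Decidable (Spec_minArr arr out) := by unfold Spec_minArr; infer_instance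

-- ===== CLAIM (what is proved, stated in full; the proofs are below) =====
def Claim_equal_minArr : Prop := ∀ (arr : List Int), Dom_minArr arr → Spec_minArr arr (minArr arr)

-- ===== LEMMAS AND PROOFS =====

theorem bPreAux (l : List Int) : ∀ (p : List Int) (s : Int),
    (l.foldl (fun (q : List Int × Int) x => (q.1 ++ [q.2 + x], q.2 + x)) (p, s)).1
      = p ++ (List.range l.length).map (fun k => s + (l.take (k+1)).sum) := by
  induction l with
  | nil => simp
  | cons x t ih =>
    intro p s
    simp only [List.foldl_cons, ih, List.length_cons, List.range_succ_eq_map, List.map_cons,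
      List.map_map, List.take_succ_cons, List.sum_cons, List.append_assoc, List.cons_append,
      List.nil_append]
    congr 1
    congr 1
    · simp
    · apply List.map_congr_left
      intro k _
      simp only [Function.comp_apply]
      ring

theorem bPre_eq (arr : List Int) :
    bPre arr = (List.range (arr.length + 1)).map (fun k => ((arr.take k).sum : Int)) := by
  unfold bPre
  rw [bPreAux]
  rw [List.range_succ_eq_map]
  simp [List.map_map, Function.comp]

theorem pre_getD (arr : List Int) (k : Nat) (hk : k ≤ arr.length) :
    (bPre arr).getD k 0 = (arr.take k).sum := by
  rw [bPre_eq]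
  rw [List.getD_eq_getElem?_getD]
  simp [Nat.lt_succ_of_le hk]

theorem slice_sum (arr : List Int) (a b : Nat) (hab : a ≤ b) :
    (PySem.List.slice arr (some (a : Int)) (some (b : Int))).sum
      = (arr.take b).sum - (arr.take a).sum := by
  rw [PySem.List.slice_natCast, List.take_drop]
  have hb : a + (b - a) = b := by omega
  rw [hb]
  have h1 := List.sum_take_add_sum_drop (arr.take b) a
  rw [List.take_take, Nat.min_eq_left hab] at h1
  omega

-- the popped candidate value is computed identically by both programs
theorem pop_val (arr : List Int) (rest : List Nat) (r : Nat) (hr : r ≤ arr.length)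
    (hrest : ∀ j ∈ rest, j < r) :
    (bPre arr).getD r 0 - (bPre arr).getD (popLeft rest + 1).toNat 0
      = (PySem.List.slice arr (some (popLeft rest + 1)) (some (r : Int))).sum := by
  rcases rest with _ | ⟨l, rest'⟩
  · have h0 : (popLeft [] + 1) = ((0 : Nat) : Int) := by simp [popLeft]
    rw [h0, slice_sum arr 0 r (Nat.zero_le r), Int.toNat_natCast,
      pre_getD arr r hr, pre_getD arr 0 (Nat.zero_le _)]
  · have hl : l < r := hrest l (by simp)
    have hle : l + 1 ≤ r := by omega
    have h1 : (popLeft (l :: rest') + 1) = (((l + 1 : Nat)) : Int) := by simp [popLeft]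
    rw [h1, slice_sum arr (l + 1) r hle, Int.toNat_natCast,
      pre_getD arr r hr, pre_getD arr (l + 1) (le_trans hle hr)]

theorem while_eq (arr : List Int) :
    ∀ (s : List Nat) (m : Int) (i : Nat), i ≤ arr.length → (∀ j ∈ s, j < i) →
      bWhile arr (bPre arr) i s m
        = (if i = arr.length then ([], aFlush arr s m) else aWhile arr i s m) := by
  intro s
  induction s with
  | nil => intro m i hi _; simp [bWhile, aWhile, aFlush]
  | cons cur rest ih =>
    intro m i hi hs
    have hrest : ∀ j ∈ rest, j < i := fun j hj => hs j (by simp [hj])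
    by_cases hin : i = arr.length
    · subst hin
      simp only [bWhile, aFlush, true_or, if_true]
      rw [pop_val arr rest arr.length le_rfl hrest, ih _ _ le_rfl hrest, if_pos rfl]
    · rw [if_neg hin]
      simp only [bWhile, aWhile, hin, false_or]
      split_ifs with hgt
      · rw [pop_val arr rest i hi hrest, ih _ _ hi hrest, if_neg hin]
      · rfl

theorem aWhile_mem (arr : List Int) (i : Nat) :
    ∀ (s : List Nat) (m : Int) (j : Nat), j ∈ (aWhile arr i s m).1 → j ∈ s := by
  intro s
  induction s with
  | nil => intro m j hj; simp [aWhile] at hj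
  | cons cur rest ih =>
    intro m j hj
    simp only [aWhile] at hj
    split_ifs at hj with hgt
    · exact List.mem_cons_of_mem _ (ih _ j hj)
    · simpa using hj

theorem step_eq (arr : List Int) (i : Nat) (hi : i < arr.length)
    (s : List Nat) (m : Int) (hs : ∀ j ∈ s, j < i) :
    bStep arr (bPre arr) (s, m) i = aStep arr (s, m) i := by
  have hin : ¬ i = arr.length := Nat.ne_of_lt hi
  unfold bStep aStep
  rw [while_eq arr s m i (le_of_lt hi) hs, if_neg hin, if_pos hi]
  rcases s with _ | ⟨top, rest⟩
  · simp [aWhile]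
  · by_cases hge : arr.getD i 0 ≥ arr.getD ((top :: rest).headD 0) 0
    · rw [if_pos hge]
      have : aWhile arr i (top :: rest) m = (top :: rest, m) := by
        simp only [aWhile]
        rw [if_neg (by simpa using hge)]
      simp [this]
    · rw [if_neg hge]

theorem fold_eq (arr : List Int) :
    ∀ (k i : Nat), i + k ≤ arr.length → ∀ (s : List Nat) (m : Int), (∀ j ∈ s, j < i) →
      (List.range' i k).foldl (bStep arr (bPre arr)) (s, m)
          = (List.range' i k).foldl (aStep arr) (s, m)
        ∧ (∀ j ∈ ((List.range' i k).foldl (aStep arr) (s, m)).1, j < i + k) := by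
  intro k
  induction k with
  | zero => intro i _ s m hs; exact ⟨rfl, by simpa using fun j hj => Nat.lt_of_lt_of_le (hs j hj) le_rfl⟩
  | succ k ih =>
    intro i hik s m hs
    have hi : i < arr.length := by omega
    rw [List.range'_succ, List.foldl_cons, List.foldl_cons, step_eq arr i hi s m hs]
    have hinv : ∀ j ∈ (aStep arr (s, m) i).1, j < i + 1 := by
      intro j hj
      unfold aStep at hj
      split_ifs at hj with hge
      · rcases List.mem_cons.mp hj with rfl | hj
        · omega
        · exact Nat.lt_succ_of_lt (hs j hj)
      · rcases List.mem_cons.mp hj with rfl | hj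
        · omega
        · exact Nat.lt_succ_of_lt (hs j (aWhile_mem arr i s m j hj))
    obtain ⟨h1, h2⟩ := ih (i + 1) (by omega) (aStep arr (s, m) i).1 (aStep arr (s, m) i).2 hinv
    constructor
    · simpa using h1
    · intro j hj
      have := h2 j (by simpa using hj)
      omega

-- ===== VERDICT (by name: the statement is the Claim_ definition above) =====
theorem minArr_spec : Claim_equal_minArr := by
  unfold Claim_equal_minArr
  intro arr _
  unfold Spec_minArr
  rcases arr with _ | ⟨a0, t⟩
  · rfl
  rcases t with _ | ⟨x, t'⟩
  · -- singleton list: A returns arr[0] ** 2, B's sentinel pass pops the single index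
    show minArr [a0] = minArr_alt [a0]
    simp [minArr, minArr_alt, bPre, bStep, bWhile, popLeft, List.range_succ, pow_two]
  · -- length ≥ 2
    have hlen : (a0 :: x :: t').length = t'.length + 2 := by simp
    show minArr (a0 :: x :: t') = minArr_alt (a0 :: x :: t')
    have hstep0 : bStep (a0 :: x :: t') (bPre (a0 :: x :: t')) ([], a0 * a0) 0
        = ([0], a0 * a0) := by
      simp [bStep, bWhile]
    have hmid := fold_eq (a0 :: x :: t') (t'.length + 1) 1 (by simp; omega) [0] (a0 * a0)
      (by intro j hj; simpa using hj)
    obtain ⟨hfold, hinv⟩ := hmid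
    have hrange : List.range ((a0 :: x :: t').length + 1)
        = 0 :: (List.range' 1 (t'.length + 1) ++ [t'.length + 2]) := by
      rw [hlen, List.range_eq_range', List.range'_succ]
      congr 1
      have : t'.length + 2 = (t'.length + 1) + 1 := rfl
      rw [this, List.range'_1_concat]
      simp
      omega
    -- evaluate B's fold: step 0, then the middle steps, then the sentinel step i = n
    have hB : minArr_alt (a0 :: x :: t')
        = (bStep (a0 :: x :: t') (bPre (a0 :: x :: t'))
            ((List.range' 1 (t'.length + 1)).foldl
              (aStep (a0 :: x :: t')) ([0], a0 * a0)) (t'.length + 2)).2 := by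
      show ((List.range ((a0 :: x :: t').length + 1)).foldl
          (bStep (a0 :: x :: t') (bPre (a0 :: x :: t'))) ([], a0 * a0)).2 = _
      rw [hrange, List.foldl_cons, hstep0, List.foldl_append, List.foldl_cons, List.foldl_nil,
        hfold]
    set sm := (List.range' 1 (t'.length + 1)).foldl (aStep (a0 :: x :: t')) ([0], a0 * a0) with hsm
    have hsent : bStep (a0 :: x :: t') (bPre (a0 :: x :: t')) sm (t'.length + 2)
        = ([], aFlush (a0 :: x :: t') sm.1 sm.2) := by
      unfold bStep
      rw [while_eq (a0 :: x :: t') sm.1 sm.2 (t'.length + 2) (by simp)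
        (by intro j hj; have := hinv j hj; omega)]
      rw [if_neg (show ¬ (t'.length + 2 < (a0 :: x :: t').length) by simp)]
      rw [if_pos (show t'.length + 2 = (a0 :: x :: t').length by simp)]
    rw [hB, hsent]
    show minArr (a0 :: x :: t') = aFlush (a0 :: x :: t') sm.1 sm.2
    unfold minArr
    rw [if_neg (by simp), if_neg (by simp)]
    simp only [hlen, List.getD_cons_zero]
    rw [pow_two]
    rfl
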